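-- pv_equiv track=rewrite | github.com/reggie-o7/TIP-102 | TIP Unit 2 Problems.py | count_endangered_species
-- ===== SOURCE A (Python) =====
-- def count_endangered_species(endangered_species, observed_species):
--     freq = {}
--     for i in observed_species:
--         freq[i] = freq.get(i,0) + 1
--
--     # endangered = [*endangered_species]
--     endangered = set(endangered_species)
--
--     ans = 0
--     for j in endangered:
--         if j in freq:
--             ans += freq[j]
--     return ans
-- ===== SOURCE B (Python) =====
-- def count_endangered_species(endangered_species, observed_species):
--     endangered = set(endangered_species)
--     return sum(1 for o in observed_species if o in endangered)
-- ===== Notes on version B (the rewrite author's own statement) =====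
-- stated objective: simpler
-- what changed: B drops A's frequency-dict pass entirely: it builds the endangered set once and counts matching observations in a single filter pass over observed_species.
import Mathlib
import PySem

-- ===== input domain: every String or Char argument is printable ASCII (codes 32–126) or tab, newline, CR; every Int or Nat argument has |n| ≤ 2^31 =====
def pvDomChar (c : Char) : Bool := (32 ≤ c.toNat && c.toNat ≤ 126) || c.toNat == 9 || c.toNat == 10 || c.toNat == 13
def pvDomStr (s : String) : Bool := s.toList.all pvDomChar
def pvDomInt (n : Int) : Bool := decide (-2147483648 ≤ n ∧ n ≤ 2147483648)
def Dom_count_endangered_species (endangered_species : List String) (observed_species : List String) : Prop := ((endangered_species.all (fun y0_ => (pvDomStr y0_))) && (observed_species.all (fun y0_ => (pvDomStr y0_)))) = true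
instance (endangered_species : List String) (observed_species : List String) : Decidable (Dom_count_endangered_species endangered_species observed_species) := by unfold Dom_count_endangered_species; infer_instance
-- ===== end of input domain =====

-- B drops A's frequency-dict pass: it builds the endangered set once and counts matching
-- observations in one filter pass ('simpler'; same return value on every input).


-- ===== PORT A =====
-- freq = {}; for i in observed: freq[i] = freq.get(i,0)+1; endangered = set(endangered);
-- ans = 0; for j in endangered: if j in freq: ans += freq[j]; return ans
-- (the loop over the Python set sums, so the result is iteration-order independent)
def count_endangered_species (endangered_species : List String) (observed_species : List String) : Int :=
  let freq : PySem.Dict String Int :=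
    observed_species.foldl (fun d i => d.insert i (d.getD i 0 + 1)) PySem.Dict.empty
  let endangered : PySem.Set String := PySem.Set.ofList endangered_species
  endangered.foldl (fun ans j => if freq.contains j then ans + freq.getD j 0 else ans) 0

-- ===== PORT B =====
-- endangered = set(endangered_species); return sum(1 for o in observed_species if o in endangered)
def count_endangered_species_alt (endangered_species : List String) (observed_species : List String) : Int :=
  let endangered : PySem.Set String := PySem.Set.ofList endangered_species
  observed_species.foldl (fun acc o => if endangered.contains o then acc + 1 else acc) 0

-- ===== PRECONDITION & SPEC =====
def Spec_count_endangered_species (endangered_species : List String) (observed_species : List String) (out : Int) : Prop := out = count_endangered_species_alt endangered_species observed_species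
instance (endangered_species : List String) (observed_species : List String) (out : Int) : Decidable (Spec_count_endangered_species endangered_species observed_species out) := by unfold Spec_count_endangered_species; infer_instance

-- ===== CLAIM (what is proved, stated in full; the proofs are below) =====
def Claim_equal_count_endangered_species : Prop := ∀ (endangered_species : List String) (observed_species : List String), Dom_count_endangered_species endangered_species observed_species → Spec_count_endangered_species endangered_species observed_species (count_endangered_species endangered_species observed_species)

-- ===== LEMMAS AND PROOFS =====

-- A's sum over the deduplicated endangered list of per-species counts equals B's
-- single filter-count over the observations, for any duplicate-free list S.
theorem sum_indicator (S : List String) (o : String) (hnd : S.Nodup) :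
    (S.map (fun j => if o = j then (1 : Int) else 0)).sum = if o ∈ S then 1 else 0 := by
  induction S with
  | nil => simp
  | cons s St ih =>
    have hnd' : St.Nodup := (List.nodup_cons.mp hnd).2
    have hns : s ∉ St := (List.nodup_cons.mp hnd).1
    by_cases h : o = s
    · subst h
      simp [ih hnd', hns]
    · simp [h, ih hnd']

theorem sum_counts_eq_countP (S obs : List String) (hnd : S.Nodup) :
    (S.map (fun j => (obs.count j : Int))).sum
      = ((obs.countP (fun o => decide (o ∈ S)) : Nat) : Int) := by
  induction obs with
  | nil => simp
  | cons o rest ih =>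
    have hsum : (S.map (fun j => (((o :: rest).count j : Nat) : Int))).sum
        = (S.map (fun j => ((rest.count j : Nat) : Int))).sum
          + (S.map (fun j => if o = j then (1 : Int) else 0)).sum := by
      rw [← List.sum_map_add]
      refine congrArg List.sum (List.map_congr_left ?_)
      intro j _
      by_cases h : o = j <;> simp [h]
    have hcnt : (o :: rest).countP (fun x => decide (x ∈ S))
        = rest.countP (fun x => decide (x ∈ S)) + (if o ∈ S then 1 else 0) := by
      by_cases h : o ∈ S <;> simp [h]
    rw [hsum, ih, sum_indicator S o hnd, hcnt]
    push_cast
    split_ifs <;> ring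

-- A's accumulator loop, rewritten: the 'j in freq' guard is redundant because a key
-- absent from the counter has count 0.
theorem portA_eq_sum (endangered_species observed_species : List String) :
    count_endangered_species endangered_species observed_species
      = ((PySem.Set.ofList endangered_species).map
          (fun j => (observed_species.count j : Int))).sum := by
  unfold count_endangered_species
  have hfreq : observed_species.foldl (fun d i => d.insert i (d.getD i 0 + 1)) PySem.Dict.empty
      = PySem.Dict.counter observed_species :=
    PySem.Dict.foldl_insert_getD_add_one_eq_counter observed_species
  rw [hfreq]
  have step : ∀ (j : String),
      (if (PySem.Dict.counter observed_species).contains j then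
        (PySem.Dict.counter observed_species).getD j 0 else 0)
      = (observed_species.count j : Int) := by
    intro j
    by_cases h : (PySem.Dict.counter observed_species).contains j
    · simp [h, PySem.Dict.getD_counter]
    · have hmem : j ∉ observed_species := by
        intro hm
        exact h (by simpa [PySem.Dict.contains_counter] using hm)
      simp [h, List.count_eq_zero_of_not_mem hmem]
  calc (PySem.Set.ofList endangered_species).foldl
        (fun ans j => if (PySem.Dict.counter observed_species).contains j then
            ans + (PySem.Dict.counter observed_species).getD j 0 else ans) 0
      = (PySem.Set.ofList endangered_species).foldl
        (fun ans j => ans + (if (PySem.Dict.counter observed_species).contains j then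
            (PySem.Dict.counter observed_species).getD j 0 else 0)) 0 := by
        have hf : (fun (ans : Int) j => if (PySem.Dict.counter observed_species).contains j then
            ans + (PySem.Dict.counter observed_species).getD j 0 else ans)
          = (fun ans j => ans + (if (PySem.Dict.counter observed_species).contains j then
            (PySem.Dict.counter observed_species).getD j 0 else 0)) := by
          funext ans j
          by_cases h : (PySem.Dict.counter observed_species).contains j <;> simp [h]
        rw [hf]
    _ = ((PySem.Set.ofList endangered_species).map
          (fun j => (if (PySem.Dict.counter observed_species).contains j then
            (PySem.Dict.counter observed_species).getD j 0 else 0))).sum := by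
        rw [PySem.List.foldl_add]; simp
    _ = ((PySem.Set.ofList endangered_species).map
          (fun j => (observed_species.count j : Int))).sum := by
        exact congrArg List.sum (List.map_congr_left (fun j _ => step j))

-- B's accumulator loop is the 0/1 indicator sum, i.e. a countP.
theorem portB_eq_countP (endangered_species observed_species : List String) :
    count_endangered_species_alt endangered_species observed_species
      = ((observed_species.countP
          (fun o => decide (o ∈ PySem.Set.ofList endangered_species)) : Nat) : Int) := by
  unfold count_endangered_species_alt
  calc observed_species.foldl
        (fun acc o => if (PySem.Set.ofList endangered_species).contains o then acc + 1 else acc) 0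
      = observed_species.foldl
        (fun acc o => acc + (if (PySem.Set.ofList endangered_species).contains o then 1 else 0)) 0 := by
        have hf : (fun (acc : Int) o => if (PySem.Set.ofList endangered_species).contains o then
            acc + 1 else acc)
          = (fun acc o => acc + (if (PySem.Set.ofList endangered_species).contains o then
            (1 : Int) else 0)) := by
          funext acc o
          split_ifs <;> ring
        rw [hf]
    _ = ((observed_species.map
          (fun o => if (PySem.Set.ofList endangered_species).contains o then (1 : Int) else 0)).sum) := by
        rw [PySem.List.foldl_add]; simp
    _ = _ := by
        rw [PySem.List.sum_map_ite_one_zero]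
        congr 1
        refine List.countP_congr (fun o _ => ?_)
        simp [PySem.Set.mem_ofList]

-- ===== VERDICT (by name: the statement is the Claim_ definition above) =====
theorem count_endangered_species_spec : Claim_equal_count_endangered_species := by
  intro endangered_species observed_species _
  unfold Spec_count_endangered_species
  rw [portA_eq_sum, portB_eq_countP,
      sum_counts_eq_countP _ _ (PySem.Set.nodup_ofList endangered_species)]
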